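-- pv_equiv track=rewrite | github.com/mcthouacbb/Google-foobar | solution2.py | search
-- ===== SOURCE A (Python) =====
-- def search(root, val):
-- 	prev = -1
-- 	left = 1
-- 	counter = 0
-- 	right_move = (root + 1) // 2
-- 	while root != val:
-- 		prev = root
-- 		span = root - left
-- 		mid = left + span // 2
-- 		if val >= mid:
-- 			left = mid
-- 			root -= 1
-- 		else:
-- 			root -= right_move
-- 		right_move >>= 1
-- 	return prev
-- ===== SOURCE B (Python) =====
-- def search(root, val):
--     # Recursive descent; width is the full breadth of the current level
--     # (halved on entry), the midpoint is computed directly from the bounds.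
--     def go(left, node, width, prev):
--         if node == val:
--             return prev
--         half = width // 2
--         mid = (left + node) // 2
--         if val < mid:
--             return go(left, node - half, half, node)
--         return go(mid, node - 1, half, node)
--     return go(1, root, root + 1, -1)
-- ===== Notes on version B (the rewrite author's own statement) =====
-- stated objective: alternative
-- what changed: B turns A's while-loop over (prev, left, root, right_move) into a recursive descent over (left, node, width): the step width is halved on entry instead of a right_move shifted at the end of each pass, the midpoint is computed directly as (left+node)//2 instead of left plus a half-span, and the branches are tested the other way round.
import Mathlib
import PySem

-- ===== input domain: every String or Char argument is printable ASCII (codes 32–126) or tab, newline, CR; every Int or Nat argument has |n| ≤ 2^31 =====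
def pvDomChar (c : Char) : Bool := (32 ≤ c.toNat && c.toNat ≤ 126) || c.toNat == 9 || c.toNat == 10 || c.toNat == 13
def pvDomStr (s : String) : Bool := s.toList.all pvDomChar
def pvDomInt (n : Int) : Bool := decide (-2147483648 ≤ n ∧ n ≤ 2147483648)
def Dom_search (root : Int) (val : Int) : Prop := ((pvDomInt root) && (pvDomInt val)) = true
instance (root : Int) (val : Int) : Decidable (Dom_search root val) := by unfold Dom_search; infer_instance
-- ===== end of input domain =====

-- B restructures A's while-loop descent into a recursive one over (left, node, width):
-- width halved on entry instead of right_move shifted at the end, midpoint computed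
-- directly as (left+node)//2, branches swapped (objective: alternative, same cost).
-- Both diverge on the same inputs; the ports totalise both with the same fuel, so the
-- equality proved is unconditional.


-- ===== PORT A =====
-- A's while loop, step for step, as fuel recursion; on every input on which the Python
-- loop terminates it runs far fewer steps than the fuel supplied by the wrapper (the
-- fuel only totalises the function — where Python A diverges the port returns prev).
-- A's dead variable `counter = 0` is never read and is omitted.
def searchLoopA (fuel : Nat) (prev left root right_move val : Int) : Int :=
  match fuel with
  | 0 => prev
  | fuel + 1 =>
    if root = val then prev
    else
      let span := root - left
      let mid := left + PySem.Int.floordiv span 2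
      if val ≥ mid then
        searchLoopA fuel root mid (root - 1) (PySem.Int.floordiv right_move 2) val
      else
        searchLoopA fuel root left (root - right_move) (PySem.Int.floordiv right_move 2) val

def search (root : Int) (val : Int) : Int :=
  searchLoopA (root.natAbs + val.natAbs + 64) (-1) 1 root
    (PySem.Int.floordiv (root + 1) 2) val

-- ===== PORT B =====
-- B's recursive helper `go`, with the same totalising fuel as A's port.
def searchGo (fuel : Nat) (left node width prev val : Int) : Int :=
  match fuel with
  | 0 => prev
  | fuel + 1 =>
    if node = val then prev
    else
      let half := PySem.Int.floordiv width 2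
      let mid := PySem.Int.floordiv (left + node) 2
      if val < mid then searchGo fuel left (node - half) half node val
      else searchGo fuel mid (node - 1) half node val

def search_alt (root : Int) (val : Int) : Int :=
  searchGo (root.natAbs + val.natAbs + 64) 1 root (root + 1) (-1) val

-- ===== PRECONDITION & SPEC =====
def Spec_search (root : Int) (val : Int) (out : Int) : Prop := out = search_alt root val
instance (root : Int) (val : Int) (out : Int) : Decidable (Spec_search root val out) := by
  unfold Spec_search; infer_instance

-- ===== CLAIM (what is proved, stated in full; the proofs are below) =====
def Claim_equal_search : Prop :=
  ∀ (root : Int) (val : Int), Dom_search root val → Spec_search root val (search root val)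

-- ===== LEMMAS AND PROOFS =====

-- A's midpoint `left + (root - left) // 2` is B's `(left + root) // 2`.
lemma mid_eq (left root : Int) :
    left + PySem.Int.floordiv (root - left) 2 = PySem.Int.floordiv (left + root) 2 := by
  rw [PySem.Int.floordiv_eq_ediv_of_pos (by norm_num),
      PySem.Int.floordiv_eq_ediv_of_pos (by norm_num)]
  have h : left + root = root - left + 2 * left := by ring
  rw [h, Int.add_mul_ediv_left _ _ (by norm_num : (2:Int) ≠ 0)]
  ring

-- Lockstep: with `width // 2 = right_move` the two descents take the same branch and
-- carry the same prev at every step, so with equal fuel they return the same value.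
lemma lockstep (fuel : Nat) : ∀ (left root width right_move prev val : Int),
    PySem.Int.floordiv width 2 = right_move →
    searchLoopA fuel prev left root right_move val
      = searchGo fuel left root width prev val := by
  induction fuel with
  | zero => intro _ _ _ _ _ _ _; rfl
  | succ fuel ih =>
    intro left root width right_move prev val hw
    simp only [searchLoopA, searchGo, hw, mid_eq]
    by_cases hroot : root = val
    · rw [if_pos hroot, if_pos hroot]
    · rw [if_neg hroot, if_neg hroot]
      by_cases hv : val ≥ PySem.Int.floordiv (left + root) 2
      · rw [if_pos hv, if_neg (by omega)]
        exact ih _ _ _ _ _ _ rfl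
      · rw [if_neg hv, if_pos (by omega)]
        exact ih _ _ _ _ _ _ rfl

-- ===== VERDICT (by name: the statement is the Claim_ definition above) =====
theorem search_spec : Claim_equal_search := by
  intro root val _
  show search root val = search_alt root val
  unfold search search_alt
  exact lockstep _ _ _ _ _ _ _ rfl
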